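-- pv_equiv track=rewrite | github.com/Bojack-BJ/openpi | src/openpi/hl_memory/target_grounding.py | _candidate_json_texts
-- ===== SOURCE A (Python) =====
-- def _candidate_json_texts(text: str) -> list[str]:
--     stripped = text.strip()
--     candidates = []
--     if "</think>" in stripped:
--         candidates.append(stripped.rsplit("</think>", maxsplit=1)[-1].strip())
--     candidates.extend(_extract_fenced_blocks(stripped))
--     candidates.append(_strip_fenced_block(stripped))
--     candidates.append(stripped)
--     deduped: list[str] = []
--     for candidate in candidates:
--         if candidate and candidate not in deduped:
--             deduped.append(candidate)
--     return deduped
--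
-- def _extract_fenced_blocks(text: str) -> list[str]:
--     blocks: list[str] = []
--     lines = text.splitlines()
--     in_block = False
--     current: list[str] = []
--     for line in lines:
--         if line.startswith("```"):
--             if in_block:
--                 blocks.append("\n".join(current).strip())
--                 current = []
--                 in_block = False
--             else:
--                 current = []
--                 in_block = True
--             continue
--         if in_block:
--             current.append(line)
--     return blocks
--
-- def _strip_fenced_block(text: str) -> str:
--     lines = text.splitlines()
--     if len(lines) >= 3 and lines[0].startswith("```") and lines[-1].startswith("```"):
--         return "\n".join(lines[1:-1]).strip()
--     return text
-- ===== SOURCE B (Python) =====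
-- def _candidate_json_texts(text: str) -> list[str]:
--     stripped = text.strip()
--     lines = stripped.splitlines()
--     candidates = []
--     if "</think>" in stripped:
--         candidates.append(stripped.rsplit("</think>", maxsplit=1)[-1].strip())
--     candidates.extend(_fenced_blocks(lines))
--     if len(lines) >= 3 and lines[0].startswith("```") and lines[-1].startswith("```"):
--         candidates.append("\n".join(lines[1:-1]).strip())
--     else:
--         candidates.append(stripped)
--     candidates.append(stripped)
--     return list(dict.fromkeys(c for c in candidates if c))
--
--
-- def _fenced_blocks(lines: list[str]) -> list[str]:
--     # locate opening/closing fence pairs and slice between them, no flag state machine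
--     blocks: list[str] = []
--     rest = lines
--     while True:
--         i = _first_fence(rest)
--         if i is None:
--             return blocks
--         rest = rest[i + 1:]
--         j = _first_fence(rest)
--         if j is None:  # unclosed fence: dropped
--             return blocks
--         blocks.append("\n".join(rest[:j]).strip())
--         rest = rest[j + 1:]
--
--
-- def _first_fence(lines: list[str]):
--     for i, line in enumerate(lines):
--         if line.startswith("```"):
--             return i
--     return None
-- ===== Notes on version B (the rewrite author's own statement) =====
-- stated objective: alternative
-- what changed: Fenced-block extraction is rewritten from A's single-pass in_block boolean state machine into a find-next-fence/pair-and-slice scanner, the lines are split once and shared with the inlined _strip_fenced_block check, and the membership-test dedup loop is replaced by dict.fromkeys over the filtered candidates.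
import Mathlib
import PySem

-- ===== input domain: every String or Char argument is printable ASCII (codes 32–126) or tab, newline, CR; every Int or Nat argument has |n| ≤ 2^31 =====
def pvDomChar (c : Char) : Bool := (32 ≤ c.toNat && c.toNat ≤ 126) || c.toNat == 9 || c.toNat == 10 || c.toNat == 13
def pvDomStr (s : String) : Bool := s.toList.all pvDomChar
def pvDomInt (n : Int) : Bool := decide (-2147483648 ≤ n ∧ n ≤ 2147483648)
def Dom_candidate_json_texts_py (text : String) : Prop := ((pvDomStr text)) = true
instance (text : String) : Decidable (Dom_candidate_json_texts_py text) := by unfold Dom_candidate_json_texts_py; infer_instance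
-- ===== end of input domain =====

-- B replaces A's boolean in_block line scanner by fence-index pairing and the dedup loop by dict.fromkeys (objective: alternative, same cost).

-- ===== PORT A =====

-- line.startswith("```")  (used by both Pythons)
def pvFence (l : String) : Bool := PySem.Str.startswith l "```"

-- s.rsplit(sep, maxsplit=1)[-1], hand-ported for the guarded case 'sep in s' (rfind ≥ 0 there):
-- the part after the LAST occurrence of sep; exact under that guard (both Pythons call it only then).
def pvRsplitTail (s sep : String) : String :=
  PySem.Str.slice s (some (PySem.Str.rfind s sep + (PySem.Str.len sep : Int))) none

-- _extract_fenced_blocks: the for-loop with state (blocks, current, in_block)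
def extractLoopA : List String → List String → List String → Bool → List String
  | [], blocks, _, _ => blocks
  | l :: rest, blocks, current, inb =>
    if pvFence l then
      if inb then
        extractLoopA rest (blocks ++ [PySem.Str.strip (PySem.Str.join "\n" current)]) [] false
      else
        extractLoopA rest blocks [] true
    else
      if inb then extractLoopA rest blocks (current ++ [l]) inb
      else extractLoopA rest blocks current inb

def extract_fenced_blocksA (text : String) : List String :=
  extractLoopA (PySem.Str.splitlines text) [] [] false

-- _strip_fenced_block (lines[0]/lines[-1] are guarded by len(lines) >= 3, so getD "" is never used)
def strip_fenced_blockA (text : String) : String :=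
  let lines := PySem.Str.splitlines text
  if 3 ≤ lines.length ∧ pvFence ((PySem.List.pyGet? lines 0).getD "") = true
      ∧ pvFence ((PySem.List.pyGet? lines (-1)).getD "") = true then
    PySem.Str.strip (PySem.Str.join "\n" (PySem.List.slice lines (some 1) (some (-1))))
  else text

def candidate_json_texts_py (text : String) : List String :=
  let stripped := PySem.Str.strip text
  let candidates : List String :=
    (if PySem.Str.isIn "</think>" stripped then
       [PySem.Str.strip (pvRsplitTail stripped "</think>")]
     else [])
    ++ extract_fenced_blocksA stripped
    ++ [strip_fenced_blockA stripped, stripped]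
  candidates.foldl
    (fun deduped c => if c ≠ "" ∧ c ∉ deduped then deduped ++ [c] else deduped) []

-- ===== PORT B =====

-- _first_fence: index of the first fence line, None if there is none
def firstFence : List String → Option Nat
  | [] => none
  | l :: t => if pvFence l then some 0 else (firstFence t).map (· + 1)

theorem firstFence_ne_nil {ls : List String} {i : Nat} (h : firstFence ls = some i) : ls ≠ [] := by
  intro hnil; subst hnil; simp [firstFence] at h

-- _fenced_blocks: pair the next two fence lines, slice between them, continue after the pair
def fencedGoB (blocks rest : List String) : List String :=
  match h : firstFence rest with
  | none => blocks
  | some i =>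
    let rest2 := rest.drop (i + 1)
    match firstFence rest2 with
    | none => blocks
    | some j =>
      fencedGoB (blocks ++ [PySem.Str.strip (PySem.Str.join "\n" (rest2.take j))])
        (rest2.drop (j + 1))
termination_by rest.length
decreasing_by
  have : rest ≠ [] := firstFence_ne_nil h
  have : 0 < rest.length := List.length_pos_iff.mpr this
  simp only [List.length_drop]
  omega

def candidate_json_texts_py_alt (text : String) : List String :=
  let stripped := PySem.Str.strip text
  let lines := PySem.Str.splitlines stripped
  let candidates : List String :=
    (if PySem.Str.isIn "</think>" stripped then
       [PySem.Str.strip (pvRsplitTail stripped "</think>")]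
     else [])
    ++ fencedGoB [] lines
    ++ [(if 3 ≤ lines.length ∧ pvFence ((PySem.List.pyGet? lines 0).getD "") = true
            ∧ pvFence ((PySem.List.pyGet? lines (-1)).getD "") = true then
          PySem.Str.strip (PySem.Str.join "\n" (PySem.List.slice lines (some 1) (some (-1))))
        else stripped), stripped]
  PySem.List.dedup (candidates.filter (fun c => c ≠ ""))

-- ===== PRECONDITION & SPEC =====
def Spec_candidate_json_texts_py (text : String) (out : List String) : Prop := out = candidate_json_texts_py_alt text
instance (text : String) (out : List String) : Decidable (Spec_candidate_json_texts_py text out) := by unfold Spec_candidate_json_texts_py; infer_instance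

-- ===== CLAIM (what is proved, stated in full; the proofs are below) =====
def Claim_equal_candidate_json_texts_py : Prop := ∀ (text : String), Dom_candidate_json_texts_py text → Spec_candidate_json_texts_py text (candidate_json_texts_py text)

-- ===== LEMMAS AND PROOFS =====

theorem fencedGoB_nil (blocks : List String) : fencedGoB blocks [] = blocks := by
  rw [fencedGoB]; simp [firstFence]

theorem fencedGoB_eq (blocks rest : List String) :
    fencedGoB blocks rest =
      match firstFence rest with
      | none => blocks
      | some i =>
        match firstFence (rest.drop (i + 1)) with
        | none => blocks
        | some j =>
          fencedGoB (blocks ++ [PySem.Str.strip (PySem.Str.join "\n" ((rest.drop (i + 1)).take j))])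
            ((rest.drop (i + 1)).drop (j + 1)) := by
  rw [fencedGoB]
  split <;> rename_i h <;> simp only [h]

theorem fencedGoB_cons_fence {l : String} (hl : pvFence l = true) (blocks t : List String) :
    fencedGoB blocks (l :: t) =
      match firstFence t with
      | none => blocks
      | some j =>
        fencedGoB (blocks ++ [PySem.Str.strip (PySem.Str.join "\n" (t.take j))]) (t.drop (j + 1)) := by
  rw [fencedGoB_eq]
  simp only [firstFence, hl, if_true, List.drop_succ_cons, List.drop_zero]

theorem fencedGoB_cons_nofence {l : String} (hl : ¬ pvFence l = true) (blocks t : List String) :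
    fencedGoB blocks (l :: t) = fencedGoB blocks t := by
  rw [fencedGoB_eq, fencedGoB_eq]
  simp only [firstFence, hl, if_false, Bool.false_eq_true]
  cases h : firstFence t with
  | none => simp
  | some i =>
    simp only [Option.map_some, List.drop_succ_cons]

theorem extractLoopA_eq_fencedGoB (ls : List String) :
    (∀ blocks cur, extractLoopA ls blocks cur false = fencedGoB blocks ls) ∧
    (∀ blocks cur, extractLoopA ls blocks cur true =
      match firstFence ls with
      | none => blocks
      | some j =>
        fencedGoB (blocks ++ [PySem.Str.strip (PySem.Str.join "\n" (cur ++ ls.take j))])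
          (ls.drop (j + 1))) := by
  induction ls with
  | nil => exact ⟨fun blocks cur => (fencedGoB_nil blocks).symm,
      fun blocks cur => by simp [extractLoopA, firstFence]⟩
  | cons l t ih =>
    constructor
    · intro blocks cur
      by_cases hl : pvFence l = true
      · rw [fencedGoB_cons_fence hl]
        simp only [extractLoopA, hl, if_true]
        rw [ih.2 blocks []]
        simp
      · rw [fencedGoB_cons_nofence hl]
        simp only [extractLoopA, hl, if_false, Bool.false_eq_true]
        exact ih.1 blocks cur
    · intro blocks cur
      by_cases hl : pvFence l = true
      · simp only [extractLoopA, hl, if_true, firstFence]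
        rw [ih.1 (blocks ++ [PySem.Str.strip (PySem.Str.join "\n" cur)]) []]
        simp
      · simp only [extractLoopA, hl, if_false, Bool.false_eq_true, firstFence]
        rw [ih.2 blocks (cur ++ [l])]
        cases h : firstFence t with
        | none => simp
        | some j => simp [List.take_succ_cons, List.drop_succ_cons]

theorem extractA_eq_goB (text : String) :
    extract_fenced_blocksA text = fencedGoB [] (PySem.Str.splitlines text) := by
  exact (extractLoopA_eq_fencedGoB (PySem.Str.splitlines text)).1 [] []

-- A's membership dedup loop computes list(dict.fromkeys(filter)) = PySem.List.dedup of the filtered list.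
theorem dedup_loop_eq (cs : List String) (acc : PySem.Set String) :
    cs.foldl (fun deduped c => if c ≠ "" ∧ c ∉ deduped then deduped ++ [c] else deduped) acc
      = (cs.filter (fun c => c ≠ "")).foldl PySem.Set.add acc := by
  induction cs generalizing acc with
  | nil => rfl
  | cons c t ih =>
    by_cases hc : c = ""
    · subst hc; simp [ih]
    · have hstep : (if c ≠ "" ∧ c ∉ acc then acc ++ [c] else acc) = PySem.Set.add acc c := by
        by_cases hm : c ∈ acc
        · rw [if_neg fun hA => hA.2 hm]; simp [PySem.Set.add, hm]
        · rw [if_pos ⟨hc, hm⟩]; simp [PySem.Set.add, hm]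
      rw [List.foldl_cons, List.filter_cons_of_pos (by simp [hc]), List.foldl_cons, hstep, ih]

-- ===== VERDICT (by name: the statement is the Claim_ definition above) =====
theorem candidate_json_texts_py_spec : Claim_equal_candidate_json_texts_py := by
  intro text _
  show candidate_json_texts_py text = candidate_json_texts_py_alt text
  simp only [candidate_json_texts_py, candidate_json_texts_py_alt, strip_fenced_blockA,
    extractA_eq_goB, dedup_loop_eq, PySem.List.dedup_eq_ofList, PySem.Set.ofList_eq_foldl]
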